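-- pv_equiv track=rewrite | github.com/denhur62/Python-Algorithm | programmers/level1/신규아이디추천.py | solution
-- ===== SOURCE A (Python) =====
-- def solution(new_id):
--     new_id=new_id.lower()
--     arr = [i for i in new_id if i.isalpha() or i.isdigit()
--         or i=="_" or i=="." or i=="-"]
--     i=0
--     while i<len(arr):
--         if arr[i:i+2]==[".","."]:
--             del arr[i]
--         else:
--             i+=1
--     if arr:
--         if arr[0]==".":
--             arr.pop(0)
--         if arr and arr[-1]==".":
--             arr.pop()
--     if not arr:
--         arr.append("a")
--     if len(arr)>=16:
--         arr=arr[:15]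
--         if arr[-1]==".":
--             arr=arr[:14]
--     if len(arr)<=2:
--         while len(arr)<=2:
--             arr.append(arr[-1])
--     return "".join(arr)
-- ===== SOURCE B (Python) =====
-- def solution(new_id):
--     out = []
--     for c in new_id.lower():
--         if c.isalpha() or c.isdigit() or c in "-_":
--             out.append(c)
--         elif c == "." and not (out and out[-1] == "."):
--             out.append(c)
--     if out and out[0] == ".":
--         del out[0]
--     if out and out[-1] == ".":
--         out.pop()
--     if not out:
--         out = ["a"]
--     out = out[:15]
--     if out[-1] == ".":
--         out.pop()
--     out += [out[-1]] * (3 - len(out))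
--     return "".join(out)
-- ===== Notes on version B (the rewrite author's own statement) =====
-- stated objective: faster
-- what changed: replaces A's quadratic del-in-place while loop (repeated list deletion to collapse '..') with a single pass that appends a dot only when the previous kept char is not a dot, and replaces A's append-one-at-a-time padding loop with a list-multiplication pad
import Mathlib
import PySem

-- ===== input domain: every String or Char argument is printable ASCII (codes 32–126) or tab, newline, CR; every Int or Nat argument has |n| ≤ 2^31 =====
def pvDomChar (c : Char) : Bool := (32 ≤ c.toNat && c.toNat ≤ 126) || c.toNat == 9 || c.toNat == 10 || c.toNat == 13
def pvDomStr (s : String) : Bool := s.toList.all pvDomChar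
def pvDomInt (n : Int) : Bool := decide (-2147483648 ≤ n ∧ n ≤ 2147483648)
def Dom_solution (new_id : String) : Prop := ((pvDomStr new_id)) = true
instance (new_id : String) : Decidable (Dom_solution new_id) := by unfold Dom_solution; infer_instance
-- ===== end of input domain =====

-- B replaces A's quadratic in-place `del` loop (collapsing "..") with one linear pass
-- that skips a dot whenever the last kept char is a dot, and A's append-per-iteration
-- padding loop with a single list-multiplication pad (objective: faster).

-- ===== PORT A =====
-- the allowed-character filter of A's list comprehension
def aAllowed (c : Char) : Bool :=
  PySem.Chars.isalpha c || PySem.Chars.isdigit c || c == '_' || c == '.' || c == '-'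

-- A's `while i < len(arr): if arr[i:i+2] == [".","."]: del arr[i] else: i += 1`
-- (arr[i:i+2] with 0 ≤ i is (arr.drop i).take 2, PySem.List.slice_toNat; del arr[i] is eraseIdx)
def eraseLoopA (arr : List Char) (i : Nat) : List Char :=
  if h : i < arr.length then
    if (arr.drop i).take 2 = ['.', '.'] then eraseLoopA (arr.eraseIdx i) i
    else eraseLoopA arr (i + 1)
  else arr
termination_by arr.length - i
decreasing_by
  · have := List.length_eraseIdx_of_lt (l := arr) (i := i) h
    omega
  · omega

-- A's `while len(arr) <= 2: arr.append(arr[-1])`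
-- (arr[-1] on [] would raise IndexError in Python; unreachable here since arr is nonempty)
def padLoopA (arr : List Char) : List Char :=
  if arr.length ≤ 2 then
    match arr.getLast? with
    | none => arr          -- Python raises IndexError here; unreachable (arr ≠ [])
    | some c => padLoopA (arr ++ [c])
  else arr
termination_by 3 - arr.length
decreasing_by simp; omega

-- A's four steps after the dedup loop, in A's order
def aFinish (arr0 : List Char) : List Char :=
  let arr := if arr0.isEmpty then arr0
    else
      let a1 := if arr0.head? = some '.' then arr0.tail else arr0
      if ¬ a1.isEmpty ∧ a1.getLast? = some '.' then a1.dropLast else a1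
  let arr := if arr.isEmpty then arr ++ ['a'] else arr
  let arr := if 16 ≤ arr.length then
      let t := arr.take 15
      if t.getLast? = some '.' then arr.take 14 else t
    else arr
  if arr.length ≤ 2 then padLoopA arr else arr

def solution (new_id : String) : String :=
  String.ofList (aFinish (eraseLoopA ((PySem.Chars.lower new_id.toList).filter aAllowed) 0))

-- ===== PORT B =====
-- `c.isalpha() or c.isdigit() or c in "-_"`
def bKeep (c : Char) : Bool :=
  PySem.Chars.isalpha c || PySem.Chars.isdigit c || c == '-' || c == '_'

-- B's single-pass loop body: append c, or append '.' only if the last kept char is not '.'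
def bStep (out : List Char) (c : Char) : List Char :=
  if bKeep c then out ++ [c]
  else if c == '.' && !(out.getLast? == some '.') then out ++ [c]
  else out

-- B's steps after the single pass (out[-1] on [] would raise in Python; unreachable, out ≠ [])
def bFinish (out0 : List Char) : List Char :=
  let out := if out0.head? = some '.' then out0.tail else out0
  let out := if out.getLast? = some '.' then out.dropLast else out
  let out := if out.isEmpty then ['a'] else out
  let out := out.take 15
  let out := if out.getLast? = some '.' then out.dropLast else out
  out ++ List.replicate (3 - out.length) (out.getLast?.getD 'a')

def solution_alt (new_id : String) : String :=
  String.ofList (bFinish ((PySem.Chars.lower new_id.toList).foldl bStep []))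

-- ===== PRECONDITION & SPEC =====
def Spec_solution (new_id : String) (out : String) : Prop := out = solution_alt new_id
instance (new_id : String) (out : String) : Decidable (Spec_solution new_id out) := by unfold Spec_solution; infer_instance

-- ===== CLAIM (what is proved, stated in full; the proofs are below) =====
def Claim_equal_solution : Prop := ∀ (new_id : String), Dom_solution new_id → Spec_solution new_id (solution new_id)

-- ===== LEMMAS AND PROOFS =====

-- unfolding lemmas for A's dedup while-loop
lemma eraseLoopA_stop (arr : List Char) (i : Nat) (h : ¬ i < arr.length) :
    eraseLoopA arr i = arr := by rw [eraseLoopA]; simp [h]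

lemma eraseLoopA_del (arr : List Char) (i : Nat) (h : i < arr.length)
    (hc : (arr.drop i).take 2 = ['.', '.']) :
    eraseLoopA arr i = eraseLoopA (arr.eraseIdx i) i := by
  rw [eraseLoopA]; simp [h, hc]

lemma eraseLoopA_step (arr : List Char) (i : Nat) (h : i < arr.length)
    (hc : ¬ (arr.drop i).take 2 = ['.', '.']) :
    eraseLoopA arr i = eraseLoopA arr (i + 1) := by
  rw [eraseLoopA]; rw [dif_pos h, if_neg hc]

-- collapse consecutive dots, given whether the previously emitted char is a dot
def sqd : Bool → List Char → List Char
  | _, [] => []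
  | pd, c :: t => if c = '.' then (if pd then sqd true t else '.' :: sqd true t) else c :: sqd false t

lemma sqd_true_eq (t : List Char) (h : t.head? ≠ some '.') : sqd true t = sqd false t := by
  cases t with
  | nil => rfl
  | cons c t =>
    simp only [List.head?_cons, ne_eq, Option.some.injEq] at h
    simp [sqd, h]

lemma eraseLoopA_shift (rest : List Char) : ∀ pre : List Char,
    eraseLoopA (pre ++ rest) pre.length = pre ++ eraseLoopA rest 0 := by
  induction rest with
  | nil =>
    intro pre
    rw [eraseLoopA_stop _ _ (by simp), eraseLoopA_stop _ _ (by simp)]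
  | cons c t ih =>
    intro pre
    have hlen : pre.length < (pre ++ c :: t).length := by simp
    have hdrop : (pre ++ c :: t).drop pre.length = c :: t := by
      exact List.drop_left
    by_cases hc : (c :: t).take 2 = ['.', '.']
    · have he1 : (pre ++ c :: t).eraseIdx pre.length = pre ++ t := by
        rw [List.eraseIdx_append_of_length_le (le_refl _)]
        simp
      rw [eraseLoopA_del _ _ hlen (by rw [hdrop]; exact hc), he1, ih pre,
          eraseLoopA_del (c :: t) 0 (by simp) (by simpa using hc)]
      rfl
    · rw [eraseLoopA_step _ _ hlen (by rw [hdrop]; exact hc),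
          eraseLoopA_step (c :: t) 0 (by simp) (by simpa using hc)]
      have h1 : eraseLoopA (pre ++ c :: t) (pre.length + 1)
          = eraseLoopA ((pre ++ [c]) ++ t) (pre ++ [c]).length := by simp
      have h2 : eraseLoopA (c :: t) 1 = eraseLoopA (([c] : List Char) ++ t) ([c] : List Char).length := by
        simp
      rw [h1, ih (pre ++ [c]), h2, ih [c]]
      simp

lemma erase0_eq_sqd : ∀ l : List Char, eraseLoopA l 0 = sqd false l := by
  intro l
  induction l with
  | nil => rw [eraseLoopA_stop _ _ (by simp)]; rfl
  | cons c t ih =>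
    by_cases hc : (c :: t).take 2 = ['.', '.']
    · match t, hc with
      | d :: t', hc =>
        have h12 : c = '.' ∧ d = '.' := by simpa using hc
        obtain ⟨rfl, rfl⟩ := h12
        rw [eraseLoopA_del ('.' :: '.' :: t') 0 (by simp) (by simp)]
        have he : (('.' :: '.' :: t').eraseIdx 0) = '.' :: t' := rfl
        rw [he, ih]
        simp [sqd]
    · rw [eraseLoopA_step (c :: t) 0 (by simp) (by simpa using hc)]
      have h2 : eraseLoopA (c :: t) 1 = eraseLoopA (([c] : List Char) ++ t) ([c] : List Char).length := by
        simp
      rw [h2, eraseLoopA_shift t [c], ih]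
      by_cases hcd : c = '.'
      · subst hcd
        have ht : t.head? ≠ some '.' := by
          cases t with
          | nil => simp
          | cons d t' =>
            intro h
            simp only [List.head?_cons, Option.some.injEq] at h
            subst h
            simp at hc
        simp [sqd, sqd_true_eq t ht]
      · simp [sqd, hcd]

lemma bKeep_dot : bKeep '.' = false := by decide

lemma aAllowed_eq (c : Char) : aAllowed c = (bKeep c || c == '.') := by
  simp only [aAllowed, bKeep]
  cases PySem.Chars.isalpha c <;> cases PySem.Chars.isdigit c <;>
    cases h1 : c == '_' <;> cases h2 : c == '.' <;> cases h3 : c == '-' <;> simp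

lemma foldl_bStep_eq : ∀ (l out : List Char),
    l.foldl bStep out = out ++ sqd (out.getLast? == some '.') (l.filter aAllowed) := by
  intro l
  induction l with
  | nil => intro out; simp [sqd]
  | cons c t ih =>
    intro out
    simp only [List.foldl_cons, List.filter_cons]
    by_cases hk : bKeep c = true
    · have hne : c ≠ '.' := by
        intro h; subst h; rw [bKeep_dot] at hk; exact Bool.false_ne_true hk
      have ha : aAllowed c = true := by rw [aAllowed_eq, hk]; rfl
      rw [bStep, if_pos hk, ih]
      have hl : (out ++ [c]).getLast? = some c := by simp
      have hb : (c == '.') = false := by simp [hne]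
      simp [ha, hl, sqd, hne, hb]
    · have ha : aAllowed c = (c == '.') := by rw [aAllowed_eq]; simp [hk]
      by_cases hcd : c = '.'
      · subst hcd
        by_cases hpd : out.getLast? = some '.'
        · rw [bStep, if_neg hk, if_neg (by simp [hpd]), ih]
          simp [ha, hpd, sqd]
        · rw [bStep, if_neg hk, if_pos (by simp [hpd]), ih]
          have hl : (out ++ ['.']).getLast? = some '.' := by simp
          simp [ha, hpd, hl, sqd]
      · have ha' : aAllowed c = false := by rw [ha]; simpa using hcd
        rw [bStep, if_neg hk, if_neg (by simp [hcd]), ih]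
        simp [ha']

-- no two consecutive dots
def NotDD (a b : Char) : Prop := ¬(a = '.' ∧ b = '.')

lemma sqd_true_head : ∀ l : List Char, (sqd true l).head? ≠ some '.' := by
  intro l
  induction l with
  | nil => simp [sqd]
  | cons c t ih =>
    by_cases hc : c = '.'
    · subst hc; simpa [sqd] using ih
    · simp [sqd, hc]

lemma sqd_chain : ∀ (l : List Char) (pd : Bool), (sqd pd l).IsChain NotDD := by
  intro l
  induction l with
  | nil => intro pd; simp [sqd]
  | cons c t ih =>
    intro pd
    by_cases hc : c = '.'
    · subst hc
      cases pd with
      | true => simpa [sqd] using ih true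
      | false =>
        have hred : sqd false ('.' :: t) = '.' :: sqd true t := by simp [sqd]
        rw [hred, List.isChain_cons]
        refine ⟨?_, ih true⟩
        intro y hy hdd
        exact sqd_true_head t (by rw [hy, hdd.2])
    · simp only [sqd, if_neg hc]
      rw [List.isChain_cons]
      exact ⟨fun y _ hdd => hc hdd.1, ih false⟩

lemma chain_dropLast_last (t : List Char) (h : t.IsChain NotDD)
    (hl : t.getLast? = some '.') : t.dropLast.getLast? ≠ some '.' := by
  have hne : t ≠ [] := by intro h0; subst h0; simp at hl
  have hdec : t.dropLast ++ [t.getLast hne] = t := List.dropLast_concat_getLast hne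
  have hlast : t.getLast hne = '.' := by
    have h1 := List.getLast?_eq_some_getLast (l := t) hne
    rw [h1] at hl
    exact Option.some.inj hl
  rw [← hdec] at h
  have h3 := (List.isChain_append.mp h).2.2
  intro hcon
  exact h3 '.' hcon '.' (by simp [hlast]) ⟨rfl, rfl⟩

lemma padLoopA_eq (u : List Char) (hu : u ≠ []) :
    padLoopA u = u ++ List.replicate (3 - u.length) (u.getLast?.getD 'a') := by
  match u with
  | [c] =>
    rw [padLoopA, if_pos (by simp)]
    simp only [List.getLast?_singleton]
    rw [padLoopA, if_pos (by simp)]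
    simp only [List.singleton_append, List.getLast?_cons_cons, List.getLast?_singleton]
    rw [padLoopA, if_neg (by simp)]
    simp [List.replicate]
  | [c, d] =>
    rw [padLoopA, if_pos (by simp)]
    simp only [List.getLast?_cons_cons, List.getLast?_singleton]
    rw [padLoopA, if_neg (by simp)]
    simp
  | c :: d :: e :: rest =>
    rw [padLoopA, if_neg (by simp)]
    have h0 : 3 - (c :: d :: e :: rest).length = 0 := by simp
    rw [h0]
    simp

-- staged normal forms of the two finishing phases
def strip1 (s : List Char) : List Char := if s.head? = some '.' then s.tail else s
def strip2 (s : List Char) : List Char := if s.getLast? = some '.' then s.dropLast else s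
def fixE (s : List Char) : List Char := if s = [] then ['a'] else s

def aRest (u : List Char) : List Char :=
  let arr := if 16 ≤ u.length then
      (let t := u.take 15; if t.getLast? = some '.' then u.take 14 else t)
    else u
  if arr.length ≤ 2 then padLoopA arr else arr

def bRest (u : List Char) : List Char :=
  let out := u.take 15
  let out := if out.getLast? = some '.' then out.dropLast else out
  out ++ List.replicate (3 - out.length) (out.getLast?.getD 'a')

lemma step2_eq (l : List Char) :
    (if ¬ l.isEmpty ∧ l.getLast? = some '.' then l.dropLast else l)
    = (if l.getLast? = some '.' then l.dropLast else l) := by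
  cases l <;> simp

lemma emptyFixA_eq (l : List Char) :
    (if l.isEmpty then l ++ ['a'] else l) = fixE l := by
  cases l <;> simp [fixE]

lemma emptyFixB_eq (l : List Char) :
    (if l.isEmpty then ['a'] else l) = fixE l := by
  cases l <;> simp [fixE]

lemma aFinish_steps (s : List Char) : aFinish s = aRest (fixE (strip2 (strip1 s))) := by
  simp only [aFinish, aRest]
  by_cases hs : s = []
  · subst hs; simp [strip1, strip2, fixE]
  · have h0 : s.isEmpty = false := by simp [hs]
    simp only [h0, Bool.false_eq_true, if_false, step2_eq, emptyFixA_eq, strip1, strip2]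

lemma bFinish_steps (s : List Char) : bFinish s = bRest (fixE (strip2 (strip1 s))) := by
  simp only [bFinish, bRest]
  simp only [emptyFixB_eq, strip1, strip2]

lemma rest_eq (u : List Char) (hune : u ≠ []) (hulast : u.getLast? ≠ some '.') :
    aRest u = bRest u := by
  simp only [aRest, bRest]
  by_cases h16 : 16 ≤ u.length
  · rw [if_pos h16]
    have hlt : (u.take 15).length = 15 := by simp; omega
    have hdl : (u.take 15).dropLast = u.take 14 := by
      rw [List.dropLast_eq_take, hlt, List.take_take]
      norm_num
    by_cases hdot : (u.take 15).getLast? = some '.'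
    · rw [if_pos hdot, if_pos hdot, ← hdl]
      have hlen : (u.take 15).dropLast.length = 14 := by rw [hdl]; simp; omega
      rw [if_neg (by omega), hlen]
      simp
    · rw [if_neg hdot, if_neg hdot, if_neg (by omega), hlt]
      simp
  · rw [if_neg h16]
    have htk : u.take 15 = u := List.take_of_length_le (by omega)
    rw [htk, if_neg hulast]
    by_cases h2 : u.length ≤ 2
    · rw [if_pos h2]
      exact padLoopA_eq u hune
    · rw [if_neg h2]
      have h0 : 3 - u.length = 0 := by omega
      rw [h0]
      simp

lemma fixE_ne (s : List Char) : fixE s ≠ [] := by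
  unfold fixE; split <;> simp_all

lemma strip1_chain (s : List Char) (h : s.IsChain NotDD) : (strip1 s).IsChain NotDD := by
  unfold strip1; split
  · exact List.IsChain.tail h
  · exact h

lemma strip2_last (s : List Char) (h : s.IsChain NotDD) :
    (strip2 s).getLast? ≠ some '.' := by
  unfold strip2; split
  · exact chain_dropLast_last s h (by assumption)
  · assumption

lemma fixE_last (s : List Char) (h : s.getLast? ≠ some '.') :
    (fixE s).getLast? ≠ some '.' := by
  unfold fixE; split
  · decide
  · exact h

lemma finish_eq (s : List Char) (hch : s.IsChain NotDD) : aFinish s = bFinish s := by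
  rw [aFinish_steps, bFinish_steps]
  exact rest_eq _ (fixE_ne _) (fixE_last _ (strip2_last _ (strip1_chain _ hch)))

-- ===== VERDICT (by name: the statement is the Claim_ definition above) =====
theorem solution_spec : Claim_equal_solution := by
  intro new_id _
  unfold Spec_solution solution solution_alt
  rw [erase0_eq_sqd, foldl_bStep_eq]
  simp only [List.getLast?_nil, List.nil_append]
  exact congrArg String.ofList (finish_eq _ (sqd_chain _ _))
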